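-- pv_equiv track=rewrite | github.com/noah-finestone/N-Queens | n-queens.py | numberOfCollisions
-- ===== SOURCE A (Python) =====
-- def numberOfCollisions(pArray):
--     numCollisions = 0
--     # checking condition for all queens -> for each col, for each row in col
--     for i in range(len(pArray)):
--         for j in range(len(pArray)):
--             if i != j:
--                 # cannot be in same diagonal
--                 if abs(pArray[i] - pArray[j]) == abs(i - j):
--                     numCollisions += 1
--                 # cannot be in same row
--                 if pArray[i] == pArray[j]:
--                     numCollisions += 1
--     return numCollisions
-- ===== SOURCE B (Python) =====
-- def numberOfCollisions(pArray):
--     rows = {}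
--     diags = {}
--     antis = {}
--     total = 0
--     for j, q in enumerate(pArray):
--         total += rows.get(q, 0) + diags.get(q - j, 0) + antis.get(q + j, 0)
--         rows[q] = rows.get(q, 0) + 1
--         diags[q - j] = diags.get(q - j, 0) + 1
--         antis[q + j] = antis.get(q + j, 0) + 1
--     return 2 * total
-- ===== Notes on version B (the rewrite author's own statement) =====
-- stated objective: faster
-- what changed: Replaces the all-pairs double loop with a single pass that counts queens per row, diagonal (q-i) and anti-diagonal (q+i) in three hash maps, adding twice the number of earlier matching queens for each queen.
import Mathlib
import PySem

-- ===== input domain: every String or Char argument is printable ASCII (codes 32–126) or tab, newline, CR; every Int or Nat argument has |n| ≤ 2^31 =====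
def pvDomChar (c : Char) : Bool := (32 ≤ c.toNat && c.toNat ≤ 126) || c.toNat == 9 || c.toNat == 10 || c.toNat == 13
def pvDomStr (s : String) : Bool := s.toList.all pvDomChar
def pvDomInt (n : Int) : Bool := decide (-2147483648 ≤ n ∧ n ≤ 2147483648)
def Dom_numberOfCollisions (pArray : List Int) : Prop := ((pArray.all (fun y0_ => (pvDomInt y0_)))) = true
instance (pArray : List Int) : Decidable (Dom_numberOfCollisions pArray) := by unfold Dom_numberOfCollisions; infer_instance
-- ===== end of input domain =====

-- B replaces A's O(n^2) double loop by a single pass that hashes queens by row, diagonal and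
-- anti-diagonal key and adds, for each queen, twice the number of earlier matching queens.

-- ===== PORT A =====
-- pArray[i] / pArray[j] ported as pyGetD: i, j come from range(len(pArray)), always in range.
def numberOfCollisions (pArray : List Int) : Int :=
  (PySem.List.pyRange 0 (pArray.length : Int) 1).foldl (fun numCollisions i =>
    (PySem.List.pyRange 0 (pArray.length : Int) 1).foldl (fun numCollisions j =>
      if i ≠ j then
        let numCollisions :=
          if (PySem.List.pyGetD pArray i 0 - PySem.List.pyGetD pArray j 0).natAbs
              = (i - j).natAbs then numCollisions + 1 else numCollisions
        if PySem.List.pyGetD pArray i 0 = PySem.List.pyGetD pArray j 0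
        then numCollisions + 1 else numCollisions
      else numCollisions) numCollisions) 0

-- ===== PORT B =====
-- one iteration of B's loop body: state = ((rows, diags, antis), total)
def altStep (st : (PySem.Dict Int Int × PySem.Dict Int Int × PySem.Dict Int Int) × Int)
    (p : Int × Int) : (PySem.Dict Int Int × PySem.Dict Int Int × PySem.Dict Int Int) × Int :=
  let j := p.1
  let q := p.2
  let rows := st.1.1
  let diags := st.1.2.1
  let antis := st.1.2.2
  let total := st.2 + rows.getD q 0 + diags.getD (q - j) 0 + antis.getD (q + j) 0
  ((rows.insert q (rows.getD q 0 + 1),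
    diags.insert (q - j) (diags.getD (q - j) 0 + 1),
    antis.insert (q + j) (antis.getD (q + j) 0 + 1)), total)

def numberOfCollisions_alt (pArray : List Int) : Int :=
  2 * ((PySem.List.enumerate pArray 0).foldl altStep
        ((PySem.Dict.empty, PySem.Dict.empty, PySem.Dict.empty), 0)).2

-- ===== PRECONDITION & SPEC =====
def Spec_numberOfCollisions (pArray : List Int) (out : Int) : Prop := out = numberOfCollisions_alt pArray
instance (pArray : List Int) (out : Int) : Decidable (Spec_numberOfCollisions pArray out) := by unfold Spec_numberOfCollisions; infer_instance

-- ===== CLAIM (what is proved, stated in full; the proofs are below) =====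
def Claim_equal_numberOfCollisions : Prop := ∀ (pArray : List Int), Dom_numberOfCollisions pArray → Spec_numberOfCollisions pArray (numberOfCollisions pArray)

-- ===== LEMMAS AND PROOFS =====

-- A's per-pair weight, in terms of the two indices
def wA (pArray : List Int) (i j : Int) : Int :=
  if i ≠ j then
    (if (PySem.List.pyGetD pArray i 0 - PySem.List.pyGetD pArray j 0).natAbs
        = (i - j).natAbs then 1 else 0)
    + (if PySem.List.pyGetD pArray i 0 = PySem.List.pyGetD pArray j 0 then 1 else 0)
  else 0

-- B's per-pair weight, in terms of enumerate pairs (index, queen)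
def mw (x y : Int × Int) : Int :=
  (if x.2 = y.2 then 1 else 0) + (if x.2 - x.1 = y.2 - y.1 then 1 else 0)
    + (if x.2 + x.1 = y.2 + y.1 then 1 else 0)

def DblSum (pArray : List Int) (e : List (Int × Int)) : Int :=
  (e.map (fun x => (e.map (fun y => wA pArray x.1 y.1)).sum)).sum

-- reference version of B's loop: a seen-list instead of the three counting dicts
def seenStep (st : List (Int × Int) × Int) (y : Int × Int) : List (Int × Int) × Int :=
  (st.1 ++ [y], st.2 + (st.1.map (fun x => mw x y)).sum)

def P (e : List (Int × Int)) : Int := (e.foldl seenStep ([], 0)).2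

-- counting dict built by inserting key f x for each x
def kf (f : Int × Int → Int) (l : List (Int × Int)) : PySem.Dict Int Int :=
  l.foldl (fun d x => d.insert (f x) (d.getD (f x) 0 + 1)) PySem.Dict.empty

lemma kf_getD (f : Int × Int → Int) (l : List (Int × Int)) (v : Int) :
    (kf f l).getD v 0 = ((l.map f).count v : Int) := by
  unfold kf
  have h := PySem.Dict.getD_foldl_insert_add_one (l.map f) PySem.Dict.empty v
  rw [List.foldl_map] at h
  simpa using h

lemma kf_append (f : Int × Int → Int) (l : List (Int × Int)) (y : Int × Int) :
    kf f (l ++ [y]) = (kf f l).insert (f y) ((kf f l).getD (f y) 0 + 1) := by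
  unfold kf
  rw [List.foldl_append]
  rfl

lemma mw_sum (l : List (Int × Int)) (y : Int × Int) :
    (l.map (fun x => mw x y)).sum
      = ((l.map (fun x => x.2)).count y.2 : Int)
        + ((l.map (fun x => x.2 - x.1)).count (y.2 - y.1) : Int)
        + ((l.map (fun x => x.2 + x.1)).count (y.2 + y.1) : Int) := by
  induction l with
  | nil => simp
  | cons a l ih =>
    simp only [List.map_cons, List.sum_cons, List.count_cons, mw, beq_iff_eq] at *
    split_ifs <;> push_cast <;> omega

lemma Bloop (e : List (Int × Int)) :
    ∀ (seen : List (Int × Int)) (t : Int),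
      (e.foldl altStep
        ((kf (fun x => x.2) seen, kf (fun x => x.2 - x.1) seen, kf (fun x => x.2 + x.1) seen), t)).2
      = (e.foldl seenStep (seen, t)).2 := by
  induction e with
  | nil => intro seen t; rfl
  | cons y rest ih =>
    intro seen t
    rw [List.foldl_cons, List.foldl_cons]
    have h1 : altStep
        ((kf (fun x => x.2) seen, kf (fun x => x.2 - x.1) seen, kf (fun x => x.2 + x.1) seen), t) y
        = ((kf (fun x => x.2) (seen ++ [y]), kf (fun x => x.2 - x.1) (seen ++ [y]),
            kf (fun x => x.2 + x.1) (seen ++ [y])),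
           t + (seen.map (fun x => mw x y)).sum) := by
      simp only [altStep, kf_append, mw_sum, kf_getD]
      ring_nf
    have h2 : seenStep (seen, t) y = (seen ++ [y], t + (seen.map (fun x => mw x y)).sum) := rfl
    rw [h1, h2]
    exact ih (seen ++ [y]) (t + (seen.map (fun x => mw x y)).sum)

lemma alt_eq_P (pArray : List Int) :
    numberOfCollisions_alt pArray = 2 * P (PySem.List.enumerate pArray 0) := by
  unfold numberOfCollisions_alt P
  have := Bloop (PySem.List.enumerate pArray 0) [] 0
  simp only [kf, List.foldl_nil] at this
  rw [this]

lemma seen_fst (e : List (Int × Int)) :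
    ∀ (seen : List (Int × Int)) (t : Int), (e.foldl seenStep (seen, t)).1 = seen ++ e := by
  induction e with
  | nil => intro seen t; simp
  | cons y rest ih =>
    intro seen t
    rw [List.foldl_cons]
    show (rest.foldl seenStep (seen ++ [y], _)).1 = _
    rw [ih]
    simp

lemma P_append (l : List (Int × Int)) (y : Int × Int) :
    P (l ++ [y]) = P l + (l.map (fun x => mw x y)).sum := by
  unfold P
  rw [List.foldl_append, List.foldl_cons, List.foldl_nil]
  show (l.foldl seenStep ([], 0)).2 + ((l.foldl seenStep ([], 0)).1.map (fun x => mw x y)).sum = _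
  rw [seen_fst]
  simp

lemma wA_eq_mw (pArray : List Int) (x y : Int × Int)
    (hx : PySem.List.pyGetD pArray x.1 0 = x.2) (hy : PySem.List.pyGetD pArray y.1 0 = y.2)
    (hne : x.1 ≠ y.1) :
    wA pArray x.1 y.1 = mw x y ∧ wA pArray y.1 x.1 = mw x y := by
  unfold wA mw
  rw [hx, hy]
  constructor
  · rw [if_pos hne]
    split_ifs <;> omega
  · rw [if_pos (Ne.symm hne)]
    split_ifs <;> omega

lemma wA_self (pArray : List Int) (i : Int) : wA pArray i i = 0 := by
  simp [wA]

lemma main_lemma (pArray : List Int) (e : List (Int × Int)) :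
    (e.map (fun x => x.1)).Nodup → (∀ p ∈ e, PySem.List.pyGetD pArray p.1 0 = p.2) →
    DblSum pArray e = 2 * P e := by
  induction e using List.reverseRecOn with
  | nil => intro _ _; simp [DblSum, P]
  | append_singleton l y ih =>
    intro hnd hq
    rw [List.map_append] at hnd
    obtain ⟨hnd1, -, hdisj⟩ := List.nodup_append.mp hnd
    have hne : ∀ x ∈ l, x.1 ≠ y.1 := by
      intro x hx heq
      exact hdisj x.1 (List.mem_map.mpr ⟨x, hx, rfl⟩) y.1 (by simp) heq
    have hqy : PySem.List.pyGetD pArray y.1 0 = y.2 := hq y (by simp)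
    have hql : ∀ p ∈ l, PySem.List.pyGetD pArray p.1 0 = p.2 := fun p hp => hq p (by simp [hp])
    have hxy : ∀ x ∈ l, wA pArray x.1 y.1 = mw x y :=
      fun x hx => (wA_eq_mw pArray x y (hql x hx) hqy (hne x hx)).1
    have hyx : ∀ x ∈ l, wA pArray y.1 x.1 = mw x y :=
      fun x hx => (wA_eq_mw pArray x y (hql x hx) hqy (hne x hx)).2
    have hexp : DblSum pArray (l ++ [y])
        = DblSum pArray l + (l.map (fun x => mw x y)).sum
          + (l.map (fun x => mw x y)).sum := by
      unfold DblSum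
      simp only [List.map_append, List.sum_append, List.map_cons, List.map_nil,
        List.sum_cons, List.sum_nil, add_zero]
      rw [PySem.List.sum_map_add_int]
      rw [List.map_congr_left hxy, List.map_congr_left hyx, wA_self]
      ring
    rw [hexp, P_append, ih hnd1 hql]
    ring

lemma enum_getD (xs : List Int) :
    ∀ (s : Int), ∀ p ∈ PySem.List.enumerate xs s,
      s ≤ p.1 ∧ p.1 < s + xs.length ∧ PySem.List.pyGetD xs (p.1 - s) 0 = p.2 := by
  induction xs with
  | nil => intro s p hp; simp [PySem.List.enumerate_nil] at hp
  | cons x xs ih =>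
    intro s p hp
    rw [PySem.List.enumerate_cons] at hp
    rcases List.mem_cons.mp hp with heq | hp'
    · subst heq
      refine ⟨le_refl s, ?_, ?_⟩
      · show s < s + ((x :: xs).length : Int)
        simp only [List.length_cons]
        push_cast
        omega
      · show PySem.List.pyGetD (x :: xs) (s - s) 0 = x
        rw [sub_self]
        exact PySem.List.pyGetD_zero_cons x xs 0
    · obtain ⟨h1, h2, h3⟩ := ih (s + 1) p hp'
      refine ⟨by omega, by simp only [List.length_cons]; push_cast; omega, ?_⟩
      have hlt : p.1 - s < ((x :: xs).length : Int) := by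
        simp only [List.length_cons]
        push_cast
        omega
      rw [PySem.List.pyGetD_eq_getElem (x :: xs) 0 (by omega) hlt]
      rw [PySem.List.pyGetD_eq_getElem xs 0 (by omega) (by omega)] at h3
      have htn : (p.1 - s).toNat = (p.1 - (s + 1)).toNat + 1 := by omega
      simp only [htn, List.getElem_cons_succ]
      exact h3

lemma A_eq_sum (pArray : List Int) :
    numberOfCollisions pArray
      = ((PySem.List.pyRange 0 (pArray.length : Int) 1).map (fun i =>
          ((PySem.List.pyRange 0 (pArray.length : Int) 1).map (fun j => wA pArray i j)).sum)).sum := by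
  unfold numberOfCollisions
  have h1 : (fun (numCollisions i : Int) =>
      (PySem.List.pyRange 0 (pArray.length : Int) 1).foldl (fun numCollisions j =>
        if i ≠ j then
          let numCollisions :=
            if (PySem.List.pyGetD pArray i 0 - PySem.List.pyGetD pArray j 0).natAbs
                = (i - j).natAbs then numCollisions + 1 else numCollisions
          if PySem.List.pyGetD pArray i 0 = PySem.List.pyGetD pArray j 0
          then numCollisions + 1 else numCollisions
        else numCollisions) numCollisions)
      = (fun (numCollisions i : Int) => numCollisions
          + ((PySem.List.pyRange 0 (pArray.length : Int) 1).map (fun j => wA pArray i j)).sum) := by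
    funext acc i
    have h2 : (fun (numCollisions j : Int) =>
        if i ≠ j then
          let numCollisions :=
            if (PySem.List.pyGetD pArray i 0 - PySem.List.pyGetD pArray j 0).natAbs
                = (i - j).natAbs then numCollisions + 1 else numCollisions
          if PySem.List.pyGetD pArray i 0 = PySem.List.pyGetD pArray j 0
          then numCollisions + 1 else numCollisions
        else numCollisions)
        = (fun (numCollisions j : Int) => numCollisions + wA pArray i j) := by
      funext acc j
      simp only [wA]
      split_ifs <;> ring
    rw [h2, PySem.List.foldl_add]
  rw [h1, PySem.List.foldl_add, zero_add]

lemma A_eq_DblSum (pArray : List Int) :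
    numberOfCollisions pArray = DblSum pArray (PySem.List.enumerate pArray 0) := by
  rw [A_eq_sum]
  have h := PySem.List.map_fst_enumerate pArray 0
  rw [zero_add] at h
  rw [← h]
  simp [DblSum, List.map_map, Function.comp_def]

-- ===== VERDICT (by name: the statement is the Claim_ definition above) =====
theorem numberOfCollisions_spec : Claim_equal_numberOfCollisions := by
  intro pArray _hdom
  unfold Spec_numberOfCollisions
  rw [A_eq_DblSum, alt_eq_P]
  apply main_lemma
  · rw [PySem.List.map_fst_enumerate, zero_add]
    exact PySem.List.nodup_pyRange_one 0 _
  · intro p hp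
    have := (enum_getD pArray 0 p hp).2.2
    rwa [sub_zero] at this
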